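-- pv_equiv track=rewrite | github.com/MateaLukiccc/Graph-Neural-Networks-and-LLMs-for-Safe-Medication-Recommendation | inference/parser.py | extract_admissions
-- ===== SOURCE A (Python) =====
-- def extract_admissions(text, names=False):
--     """
--     Extracts ICD9_CODE, PROCEDURE, and ATC3 codes for each admission in the text.
--     Returns a list of dicts, each representing an admission.
--     """
--     lines = text.splitlines()
--     admissions = []
--     current = None
--     i = 0
--     icd_line = "ICD9 Diagnosis"
--     proc_line = "Procedures"
--     atc3_line = "Medications (ATC3)"
--
--     while i < len(lines):
--         line = lines[i].strip()
--         if line.startswith("Admission #"):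
--             if current:
--                 admissions.append(current)
--             current = {"ICD9_CODE": [], "PROCEDURE": [], "ATC3": []}
--         elif line == icd_line and current is not None:
--             i += 1
--             if i < len(lines):
--                 current["ICD9_CODE"] = [code.strip() for code in lines[i].split(",") if code.strip()]
--         elif line == proc_line and current is not None:
--             i += 1
--             if i < len(lines):
--                 current["PROCEDURE"] = [code.strip() for code in lines[i].split(",") if code.strip()]
--         elif line == atc3_line and current is not None:
--             i += 1
--             if i < len(lines):
--                 current["ATC3"] = [code.strip() for code in lines[i].split(",") if code.strip()]
--         i += 1
--     if current:
--         admissions.append(current)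
--     return admissions
-- ===== SOURCE B (Python) =====
-- FIELDS = {
--     "ICD9 Diagnosis": "ICD9_CODE",
--     "Procedures": "PROCEDURE",
--     "Medications (ATC3)": "ATC3",
-- }
--
--
-- def extract_admissions(text, names=False):
--     """Three staged passes instead of one indexed loop:
--     1) locate the first 'Admission #' line and drop everything before it;
--     2) tokenize the remainder into a flat event list (None = new admission,
--        (field, codes) = a header together with the data line it consumes,
--        taken from the iterator with next());
--     3) group the events: None appends a fresh record, a field event is
--        written into the last record."""
--     lines = text.splitlines()
--     start = next((i for i, l in enumerate(lines)
--                   if l.strip().startswith("Admission #")), None)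
--     if start is None:
--         return []
--     events = []
--     it = iter(lines[start:])
--     for raw in it:
--         line = raw.strip()
--         if line.startswith("Admission #"):
--             events.append(None)
--         elif line in FIELDS:
--             data = next(it, None)
--             if data is not None:
--                 events.append((FIELDS[line],
--                                [c.strip() for c in data.split(",") if c.strip()]))
--     admissions = []
--     for ev in events:
--         if ev is None:
--             admissions.append({"ICD9_CODE": [], "PROCEDURE": [], "ATC3": []})
--         else:
--             admissions[-1][ev[0]] = ev[1]
--     return admissions
-- ===== Notes on version B (the rewrite author's own statement) =====
-- stated objective: alternative
-- what changed: Replaces A's single indexed while loop with stateful lookahead by three staged passes: drop the preamble before the first admission-header line, tokenize the rest into a flat event list (new-admission markers and field/codes pairs consumed from an iterator), then group the events by appending a fresh record on each marker and writing field events into the last record - no current/flush state.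
import Mathlib
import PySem

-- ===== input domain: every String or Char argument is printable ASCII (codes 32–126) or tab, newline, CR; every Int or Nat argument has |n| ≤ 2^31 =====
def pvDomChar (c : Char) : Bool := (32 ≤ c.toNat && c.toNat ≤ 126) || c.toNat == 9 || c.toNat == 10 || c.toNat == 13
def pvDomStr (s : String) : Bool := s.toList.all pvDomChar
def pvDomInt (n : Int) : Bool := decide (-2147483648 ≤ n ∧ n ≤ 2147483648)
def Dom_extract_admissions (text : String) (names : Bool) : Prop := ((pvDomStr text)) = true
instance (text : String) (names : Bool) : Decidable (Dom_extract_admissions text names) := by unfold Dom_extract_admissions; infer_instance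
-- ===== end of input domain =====

set_option maxHeartbeats 1000000


-- B replaces A's single indexed while loop (lookahead via i += 1, current/flush state) by three
-- staged passes: drop the preamble, tokenize into a flat event list, group the events.
-- Return value only; neither version mutates its input.

-- ===== PORT A =====
-- [code.strip() for code in s.split(",") if code.strip()]
def pvCodes (s : String) : List String :=
  (((PySem.Str.split? s ",").getD []).map PySem.Str.strip).filter (fun c => c ≠ "")

-- {"ICD9_CODE": [], "PROCEDURE": [], "ATC3": []}
def pvNewAdm : PySem.Dict String (List String) :=
  PySem.Dict.ofList [("ICD9_CODE", []), ("PROCEDURE", []), ("ATC3", [])]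

-- A's while loop over lines with index i; the header branches consume lines[i+1] when it exists
-- (fuel = number of remaining loop iterations, a pure totality device: each step consumes
-- one or two lines and one fuel, so fuel = length of the line list always suffices).
def pvLoopA : Nat → List String → Option (PySem.Dict String (List String)) →
    List (PySem.Dict String (List String)) → List (PySem.Dict String (List String))
  | _, [], cur, acc => acc ++ cur.toList
  | 0, _ :: _, cur, acc => acc ++ cur.toList
  | fuel + 1, l :: rest, cur, acc =>
    let line := PySem.Str.strip l
    if PySem.Str.startswith line "Admission #" then
      pvLoopA fuel rest (some pvNewAdm) (acc ++ cur.toList)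
    else
      match cur with
      | none => pvLoopA fuel rest none acc
      | some c =>
        if line = "ICD9 Diagnosis" then
          match rest with
          | [] => acc ++ [c]
          | x :: rest' => pvLoopA fuel rest' (some (c.insert "ICD9_CODE" (pvCodes x))) acc
        else if line = "Procedures" then
          match rest with
          | [] => acc ++ [c]
          | x :: rest' => pvLoopA fuel rest' (some (c.insert "PROCEDURE" (pvCodes x))) acc
        else if line = "Medications (ATC3)" then
          match rest with
          | [] => acc ++ [c]
          | x :: rest' => pvLoopA fuel rest' (some (c.insert "ATC3" (pvCodes x))) acc
        else pvLoopA fuel rest (some c) acc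

def extract_admissions (text : String) (names : Bool) : List (List (String × List String)) :=
  (pvLoopA (PySem.Str.splitlines text).length (PySem.Str.splitlines text) none []).map (·.items)

-- ===== PORT B =====
def pvFields : PySem.Dict String String :=
  PySem.Dict.ofList [("ICD9 Diagnosis", "ICD9_CODE"), ("Procedures", "PROCEDURE"),
                     ("Medications (ATC3)", "ATC3")]

-- stage 2: tokenize the (dropped) line list into a flat event list; a header takes its data
-- line straight off the iterator with next(it, None) — here: off the list.
def pvEvents : List String → List (Option (String × List String))
  | [] => []
  | raw :: rest =>
    let line := PySem.Str.strip raw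
    if PySem.Str.startswith line "Admission #" then none :: pvEvents rest
    else
      match pvFields.get? line with
      | some f =>
        match rest with
        | [] => []                      -- next(it, None) returned None: no event, loop ends
        | d :: rest' => some (f, pvCodes d) :: pvEvents rest'
      | none => pvEvents rest

-- admissions[-1][f] = cs  (functional rendering of writing into the last record;
-- the [] case is unreachable in the pipeline: the first event is always a marker)
def pvSetLast (acc : List (PySem.Dict String (List String))) (f : String) (cs : List String) :
    List (PySem.Dict String (List String)) :=
  match acc with
  | [] => []
  | [c] => [c.insert f cs]
  | x :: rest => x :: pvSetLast rest f cs

-- stage 3: group the events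
def pvBuild : List (Option (String × List String)) → List (PySem.Dict String (List String)) →
    List (PySem.Dict String (List String))
  | [], acc => acc
  | none :: evs, acc => pvBuild evs (acc ++ [pvNewAdm])
  | some (f, cs) :: evs, acc => pvBuild evs (pvSetLast acc f cs)

def extract_admissions_alt (text : String) (names : Bool) : List (List (String × List String)) :=
  let lines := PySem.Str.splitlines text
  -- stage 1: next((i for i, l in enumerate(lines) if l.strip().startswith(...)), None)
  match lines.findIdx? (fun l => PySem.Str.startswith (PySem.Str.strip l) "Admission #") with
  | none => []
  | some s => (pvBuild (pvEvents (lines.drop s)) []).map (·.items)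

-- ===== PRECONDITION & SPEC =====
def Spec_extract_admissions (text : String) (names : Bool) (out : List (List (String × List String))) : Prop := out = extract_admissions_alt text names
instance (text : String) (names : Bool) (out : List (List (String × List String))) : Decidable (Spec_extract_admissions text names out) := by unfold Spec_extract_admissions; infer_instance

-- ===== CLAIM (what is proved, stated in full; the proofs are below) =====
def Claim_equal_extract_admissions : Prop := ∀ (text : String) (names : Bool), Dom_extract_admissions text names → Spec_extract_admissions text names (extract_admissions text names)

-- ===== LEMMAS AND PROOFS =====
-- B's field table, characterised as the elif chain A uses
theorem pvFields_get (line : String) :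
    pvFields.get? line =
      if line = "ICD9 Diagnosis" then some "ICD9_CODE"
      else if line = "Procedures" then some "PROCEDURE"
      else if line = "Medications (ATC3)" then some "ATC3"
      else none := by
  by_cases h1 : line = "ICD9 Diagnosis"
  · subst h1; rfl
  by_cases h2 : line = "Procedures"
  · subst h2; rfl
  by_cases h3 : line = "Medications (ATC3)"
  · subst h3; rfl
  have hdmk : pvFields = PySem.Dict.mk [("ICD9 Diagnosis", "ICD9_CODE"),
      ("Procedures", "PROCEDURE"), ("Medications (ATC3)", "ATC3")] := rfl
  have b1 : ("ICD9 Diagnosis" == line) = false := beq_eq_false_iff_ne.mpr (Ne.symm h1)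
  have b2 : ("Procedures" == line) = false := beq_eq_false_iff_ne.mpr (Ne.symm h2)
  have b3 : ("Medications (ATC3)" == line) = false := beq_eq_false_iff_ne.mpr (Ne.symm h3)
  simp [hdmk, PySem.Dict.get?, List.find?, b1, b2, b3, h1, h2, h3]

-- writing into the last record is inserting into the flushed current
theorem pvSetLast_append (xs : List (PySem.Dict String (List String)))
    (c : PySem.Dict String (List String)) (f : String) (cs : List String) :
    pvSetLast (xs ++ [c]) f cs = xs ++ [c.insert f cs] := by
  induction xs with
  | nil => rfl
  | cons x xs ih =>
    cases xs with
    | nil => rfl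
    | cons y ys =>
      show x :: pvSetLast ((y :: ys) ++ [c]) f cs = x :: ((y :: ys) ++ [c.insert f cs])
      rw [ih]

-- once an admission is open, A's remaining loop is B's tokenize-then-group on the remaining lines
theorem pvLoopA_some_eq : ∀ (fuel : Nat) (ls : List String), ls.length ≤ fuel →
    ∀ c acc, pvLoopA fuel ls (some c) acc = pvBuild (pvEvents ls) (acc ++ [c]) := by
  intro fuel
  induction fuel with
  | zero =>
    intro ls h c acc
    have hnil : ls = [] := by cases ls <;> simp_all
    subst hnil; rfl
  | succ n ih =>
    intro ls h c acc
    cases ls with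
    | nil => rfl
    | cons l rest =>
      have hrest : rest.length ≤ n := by simp at h; omega
      simp only [pvLoopA, pvEvents]
      by_cases hadm : PySem.Str.startswith (PySem.Str.strip l) "Admission #"
      · simp only [if_pos hadm, pvBuild]
        rw [ih rest hrest]
        simp
      · simp only [if_neg hadm]
        rw [pvFields_get]
        by_cases h1 : PySem.Str.strip l = "ICD9 Diagnosis"
        · simp only [if_pos h1]
          cases rest with
          | nil => rfl
          | cons x rest' =>
            simp only [pvBuild]
            rw [ih rest' (by simp at hrest; omega), pvSetLast_append]
        · simp only [if_neg h1]
          by_cases h2 : PySem.Str.strip l = "Procedures"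
          · simp only [if_pos h2]
            cases rest with
            | nil => rfl
            | cons x rest' =>
              simp only [pvBuild]
              rw [ih rest' (by simp at hrest; omega), pvSetLast_append]
          · simp only [if_neg h2]
            by_cases h3 : PySem.Str.strip l = "Medications (ATC3)"
            · simp only [if_pos h3]
              cases rest with
              | nil => rfl
              | cons x rest' =>
                simp only [pvBuild]
                rw [ih rest' (by simp at hrest; omega), pvSetLast_append]
            · simp only [if_neg h3]
              exact ih rest hrest c acc

-- while no admission is open, A skips lines until the first "Admission #" line (B's stage 1)
theorem pvLoopA_none_eq : ∀ (fuel : Nat) (ls : List String), ls.length ≤ fuel →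
    pvLoopA fuel ls none [] =
      match ls.findIdx? (fun l => PySem.Str.startswith (PySem.Str.strip l) "Admission #") with
      | none => []
      | some s => pvBuild (pvEvents (ls.drop s)) [] := by
  intro fuel
  induction fuel with
  | zero =>
    intro ls h
    have hnil : ls = [] := by cases ls <;> simp_all
    subst hnil; rfl
  | succ n ih =>
    intro ls h
    cases ls with
    | nil => rfl
    | cons l rest =>
      have hrest : rest.length ≤ n := by simp at h; omega
      simp only [pvLoopA]
      by_cases hadm : PySem.Str.startswith (PySem.Str.strip l) "Admission #"
      · simp only [List.findIdx?_cons, hadm, if_true, List.drop_zero,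
          Option.toList_none, List.append_nil]
        rw [pvLoopA_some_eq n rest hrest pvNewAdm []]
        simp only [pvEvents, hadm, if_true, pvBuild, List.nil_append]
      · simp only [List.findIdx?_cons, hadm, if_false, Bool.false_eq_true]
        rw [ih rest hrest]
        cases hfi : rest.findIdx? (fun l => PySem.Str.startswith (PySem.Str.strip l) "Admission #") with
        | none => rfl
        | some s => rfl

-- ===== VERDICT (by name: the statement is the Claim_ definition above) =====
theorem extract_admissions_spec : Claim_equal_extract_admissions := by
  intro text names _
  unfold Spec_extract_admissions extract_admissions extract_admissions_alt
  rw [pvLoopA_none_eq (PySem.Str.splitlines text).length (PySem.Str.splitlines text) le_rfl]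
  cases hfi : (PySem.Str.splitlines text).findIdx?
      (fun l => PySem.Str.startswith (PySem.Str.strip l) "Admission #") with
  | none => simp only [hfi]; rfl
  | some s => simp only [hfi]
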